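-- pv_equiv track=rewrite | github.com/debbiemarkslab/EVcouplings | evcouplings/fold/filter.py | detect_secstruct_clash
-- ===== SOURCE A (Python) =====
-- from operator import xor
--
-- def detect_secstruct_clash(i, j, secstruct):
--     """
--     Detect if an EC pair (i, j) is geometrically
--     impossible given a predicted secondary structure
--
--     Based on direct port of the logic implemented in
--     choose_CNS_constraint_set.m from original pipeline,
--     lines 351-407.
--
--     Use secstruct_clashes() to annotate an entire
--     table of ECs.
--
--     Parameters
--     ----------
--     i : int
--         Index of first position
--     j : int
--         Index of second position
--     secstruct : dict
--         Mapping from position (int) to secondary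
--         structure ("H", "E", "C")
--
--     Returns
--     -------
--     clashes : bool
--         True if (i, j) clashes with secondary
--         structure
--     """
--
--     # extract a secondary structure substring
--     # start and end are inclusive
--     def _get_range(start, end):
--         return "".join(
--             [secstruct[pos] for pos in range(start, end + 1)]
--         )
--
--     def _all_equal(string, char):
--         return string == len(string) * char
--
--     # get bigger and smaller of the two positions
--     b = max(i, j)
--     s = min(i, j)
--
--     # if pair too distant in primary sequence, do
--     # not consider for clash
--     if b - s >= 15:
--         return False
--
--     # get secondary structure in range between pairs
--     secstruct_string = _get_range(s, b)
--
--     # part 1: check for clashes based on alpha helices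
--     # first check for helix between them, or both in a helix
--     # (or either one directly next to helix)
--     if _all_equal(_get_range(s + 1, b - 1), "H"):
--         return True
--     # of if just one of them is in a helix
--     elif xor(secstruct[s] == "H", secstruct[b] == "H"):
--         h2 = "H" * (b - s - 1)
--         h3 = "H" * (b - s - 2)
--         if h2 in secstruct_string:
--             if b - s > 6:
--                 return True
--         elif h3 in secstruct_string:
--             if b - s > 11:
--                 return True
--
--     # part 2: check for clashes based on beta strands
--     if _all_equal(_get_range(s + 1, b - 1), "E"):
--         return True
--     elif _all_equal(_get_range(s + 2, b - 2), "E"):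
--         if b - s > 8:
--             return True
--
--     if xor(secstruct[s] == "E", secstruct[b] == "E"):
--         e2 = "E" * (b - s - 1)
--         e3 = "E" * (b - s - 2)
--         e4 = "E" * (b - s - 3)
--
--         if e2 in secstruct_string:
--             return True
--         elif e3 in secstruct_string:
--             return True
--         elif e4 in secstruct_string:
--             if b - s > 8:
--                 return True
--
--     return False
-- ===== SOURCE B (Python) =====
-- def detect_secstruct_clash(i, j, secstruct):
--     """Same decision as A, but all substring ("H"*k in ...) and
--     all-equal string tests are replaced by one left-to-right pass that
--     maintains run-length counters and all-of-one-letter flags, followed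
--     by integer comparisons."""
--     b, s = max(i, j), min(i, j)
--     d = b - s
--     if d >= 15:
--         return False
--     vals = [secstruct[p] for p in range(s, b + 1)]
--     # one pass: maximal runs of consecutive 'H' / 'E' in the concatenation
--     maxH = maxE = curH = curE = 0
--     for ch in (c for v in vals for c in v):
--         curH = curH + 1 if ch == 'H' else 0
--         curE = curE + 1 if ch == 'E' else 0
--         if curH > maxH:
--             maxH = curH
--         if curE > maxE:
--             maxE = curE
--     int_all_H = all(c == 'H' for v in vals[1:-1] for c in v)
--     int_all_E = all(c == 'E' for v in vals[1:-1] for c in v)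
--     inn_all_E = all(c == 'E' for v in vals[2:-2] for c in v)
--     sH, bH = secstruct[s] == 'H', secstruct[b] == 'H'
--     sE, bE = secstruct[s] == 'E', secstruct[b] == 'E'
--     if int_all_H:
--         return True
--     if sH != bH:
--         if maxH >= d - 1:
--             if d > 6:
--                 return True
--         elif maxH >= d - 2:
--             if d > 11:
--                 return True
--     if int_all_E:
--         return True
--     if inn_all_E and d > 8:
--         return True
--     if sE != bE:
--         if maxE >= d - 2:      # "E"*(d-1) or "E"*(d-2) present
--             return True
--         if maxE >= d - 3 and d > 8:
--             return True
--     return False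
-- ===== Notes on version B (the rewrite author's own statement) =====
-- stated objective: alternative
-- what changed: All substring membership tests ("H"*k in range-string) and string-equality all-equal tests of A are replaced by a single left-to-right pass computing maximal consecutive-'H'/'E' run lengths and all-of-one-letter flags, after which the decision cascade is pure integer comparisons (the three E-substring tests collapse to two run-length thresholds).
import Mathlib
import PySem

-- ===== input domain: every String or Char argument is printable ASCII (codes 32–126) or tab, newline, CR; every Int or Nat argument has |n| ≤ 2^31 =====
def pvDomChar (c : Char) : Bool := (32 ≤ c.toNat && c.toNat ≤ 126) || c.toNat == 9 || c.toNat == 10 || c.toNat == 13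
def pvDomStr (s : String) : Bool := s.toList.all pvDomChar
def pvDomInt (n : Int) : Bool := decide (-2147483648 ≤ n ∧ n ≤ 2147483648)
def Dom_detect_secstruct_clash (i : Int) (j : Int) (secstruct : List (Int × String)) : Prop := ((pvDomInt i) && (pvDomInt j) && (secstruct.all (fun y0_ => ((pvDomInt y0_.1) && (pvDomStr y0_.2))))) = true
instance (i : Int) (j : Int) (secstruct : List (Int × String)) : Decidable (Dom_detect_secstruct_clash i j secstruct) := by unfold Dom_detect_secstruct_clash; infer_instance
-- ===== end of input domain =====

-- B replaces A's substring-membership and string-equality tests by one pass computing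
-- maximal 'H'/'E' run lengths and all-of-one-letter flags, deciding via integer comparisons.

-- ===== PORT A =====
-- dict lookup secstruct[pos]; missing keys (Python KeyError) are excluded by Pre_, default "" unused inside Pre_
def pvLookA (secstruct : List (Int × String)) (pos : Int) : String :=
  (List.lookup pos secstruct).getD ""

-- _get_range(start, end) = "".join(secstruct[pos] for pos in range(start, end+1)), as a char list
def pvGetRange (secstruct : List (Int × String)) (start fin : Int) : List Char :=
  ((PySem.List.pyRange start (fin + 1) 1).map (fun pos => (pvLookA secstruct pos).toList)).flatten

-- _all_equal(string, char) = string == len(string) * char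
def pvAllEqual (l : List Char) (c : Char) : Bool := l == List.replicate l.length c

-- part 2 / part 3 of A (the code after part 1's fall-through), literally
def pvPart3A (secstruct : List (Int × String)) (s b : Int) (str : List Char) : Bool :=
  if xor (pvLookA secstruct s == "E") (pvLookA secstruct b == "E") then
    if PySem.Chars.isIn (List.replicate (b - s - 1).toNat 'E') str then true
    else if PySem.Chars.isIn (List.replicate (b - s - 2).toNat 'E') str then true
    else if PySem.Chars.isIn (List.replicate (b - s - 3).toNat 'E') str then decide (b - s > 8)
    else false
  else false

def pvPart2A (secstruct : List (Int × String)) (s b : Int) (str : List Char) : Bool :=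
  if pvAllEqual (pvGetRange secstruct (s + 1) (b - 1)) 'E' then true
  else if pvAllEqual (pvGetRange secstruct (s + 2) (b - 2)) 'E' then
    if b - s > 8 then true else pvPart3A secstruct s b str
  else pvPart3A secstruct s b str

def detect_secstruct_clash (i : Int) (j : Int) (secstruct : List (Int × String)) : Bool :=
  let b := max i j
  let s := min i j
  if b - s ≥ 15 then false
  else
    let str := pvGetRange secstruct s b
    if pvAllEqual (pvGetRange secstruct (s + 1) (b - 1)) 'H' then true
    else if xor (pvLookA secstruct s == "H") (pvLookA secstruct b == "H") then
      if PySem.Chars.isIn (List.replicate (b - s - 1).toNat 'H') str then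
        if b - s > 6 then true else pvPart2A secstruct s b str
      else if PySem.Chars.isIn (List.replicate (b - s - 2).toNat 'H') str then
        if b - s > 11 then true else pvPart2A secstruct s b str
      else pvPart2A secstruct s b str
    else pvPart2A secstruct s b str

-- ===== PORT B =====
def pvLookB (secstruct : List (Int × String)) (pos : Int) : String :=
  (List.lookup pos secstruct).getD ""

-- one step of Source B's run-counting loop: state ((curH, maxH), (curE, maxE))
def pvRunStep (st : (Int × Int) × (Int × Int)) (ch : Char) : (Int × Int) × (Int × Int) :=
  let curH := if ch == 'H' then st.1.1 + 1 else 0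
  let curE := if ch == 'E' then st.2.1 + 1 else 0
  ((curH, max st.1.2 curH), (curE, max st.2.2 curE))

-- Source B's code after the H section (the two E-flag returns, then the E-xor block)
def pvPart3B (sE bE : Bool) (d maxE : Int) : Bool :=
  if sE != bE then
    if maxE ≥ d - 2 then true
    else if maxE ≥ d - 3 ∧ d > 8 then true
    else false
  else false

def pvPart2B (intAllE innAllE : Bool) (d maxE : Int) (sE bE : Bool) : Bool :=
  if intAllE then true
  else if innAllE ∧ d > 8 then true
  else pvPart3B sE bE d maxE

def detect_secstruct_clash_alt (i : Int) (j : Int) (secstruct : List (Int × String)) : Bool :=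
  let b := max i j
  let s := min i j
  let d := b - s
  if d ≥ 15 then false
  else
    let vals := (PySem.List.pyRange s (b + 1) 1).map (fun p => pvLookB secstruct p)
    let st := ((vals.map String.toList).flatten).foldl pvRunStep ((0, 0), (0, 0))
    let maxH := st.1.2
    let maxE := st.2.2
    let intAllH := ((vals.drop 1).dropLast).all (fun v => v.toList.all (· == 'H'))
    let intAllE := ((vals.drop 1).dropLast).all (fun v => v.toList.all (· == 'E'))
    let innAllE := (((vals.drop 2).dropLast).dropLast).all (fun v => v.toList.all (· == 'E'))
    let sE := pvLookB secstruct s == "E"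
    let bE := pvLookB secstruct b == "E"
    if intAllH then true
    else if (pvLookB secstruct s == "H") != (pvLookB secstruct b == "H") then
      if maxH ≥ d - 1 then
        (if d > 6 then true else pvPart2B intAllE innAllE d maxE sE bE)
      else if maxH ≥ d - 2 then
        (if d > 11 then true else pvPart2B intAllE innAllE d maxE sE bE)
      else pvPart2B intAllE innAllE d maxE sE bE
    else pvPart2B intAllE innAllE d maxE sE bE

-- ===== PRECONDITION & SPEC =====
-- Pre_ excludes exactly the inputs where Python A raises KeyError: some position in
-- [min i j, max i j] is missing from the dict while the pair is close enough to be examined.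
def Pre_detect_secstruct_clash (i : Int) (j : Int) (secstruct : List (Int × String)) : Prop :=
  max i j - min i j ≥ 15 ∨
    ∀ p ∈ PySem.List.pyRange (min i j) (max i j + 1) 1, (List.lookup p secstruct).isSome

instance (i : Int) (j : Int) (secstruct : List (Int × String)) : Decidable (Pre_detect_secstruct_clash i j secstruct) := by unfold Pre_detect_secstruct_clash; infer_instance

def pvWitness_detect_secstruct_clash : Int × Int × (List (Int × String)) :=
  (1, 3, [(1, "C"), (2, "H"), (3, "C")])

def Spec_detect_secstruct_clash (i : Int) (j : Int) (secstruct : List (Int × String)) (out : Bool) : Prop := out = detect_secstruct_clash_alt i j secstruct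
instance (i : Int) (j : Int) (secstruct : List (Int × String)) (out : Bool) : Decidable (Spec_detect_secstruct_clash i j secstruct out) := by unfold Spec_detect_secstruct_clash; infer_instance

-- ===== CLAIM (what is proved, stated in full; the proofs are below) =====
def Claim_equal_detect_secstruct_clash : Prop := ∀ (i : Int) (j : Int) (secstruct : List (Int × String)), Dom_detect_secstruct_clash i j secstruct → Pre_detect_secstruct_clash i j secstruct → Spec_detect_secstruct_clash i j secstruct (detect_secstruct_clash i j secstruct)

-- ===== LEMMAS AND PROOFS =====

-- length of the leading run of c, and the maximal run of c
def pvLead (c : Char) (l : List Char) : Nat := (l.takeWhile (· == c)).length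

def pvMrun (c : Char) : List Char → Nat
  | [] => 0
  | x :: t => max (pvLead c (x :: t)) (pvMrun c t)

theorem pvLead_cons (c x : Char) (t : List Char) :
    pvLead c (x :: t) = if x == c then pvLead c t + 1 else 0 := by
  simp only [pvLead, List.takeWhile_cons]
  by_cases h : x == c <;> simp [h]

theorem pvLead_replicate_append (c : Char) (k : Nat) (t : List Char) :
    pvLead c (List.replicate k c ++ t) = k + pvLead c t := by
  induction k with
  | zero => simp
  | succ k ih => simp [List.replicate_succ, pvLead_cons, ih]; omega

theorem pvMrun_replicate (c : Char) (k : Nat) : pvMrun c (List.replicate k c) = k := by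
  induction k with
  | zero => simp [pvMrun]
  | succ k ih =>
      simp only [List.replicate_succ, pvMrun, ih]
      rw [show (c :: List.replicate k c) = List.replicate (k+1) c ++ [] by simp [List.replicate_succ]]
      rw [pvLead_replicate_append]
      simp [pvLead]

theorem pvLe_mrun_replicate_append (c : Char) (k : Nat) (t : List Char) :
    k ≤ pvMrun c (List.replicate k c ++ t) := by
  cases k with
  | zero => simp
  | succ k =>
      have h : List.replicate (k+1) c ++ t = c :: (List.replicate k c ++ t) := by
        simp [List.replicate_succ]
      rw [h, pvMrun]
      have := pvLead_replicate_append c (k+1) t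
      rw [h] at this
      omega

theorem pvMrun_replicate_append_ne (c x : Char) (hx : ¬ x = c) (k : Nat) (t : List Char) :
    pvMrun c (List.replicate k c ++ x :: t) = max k (pvMrun c (x :: t)) := by
  induction k with
  | zero => simp
  | succ k ih =>
      have h : List.replicate (k+1) c ++ x :: t = c :: (List.replicate k c ++ x :: t) := by
        simp [List.replicate_succ]
      rw [h, pvMrun, ih]
      have hl : pvLead c (c :: (List.replicate k c ++ x :: t)) = k + 1 := by
        rw [show (c :: (List.replicate k c ++ x :: t)) = List.replicate (k+1) c ++ x :: t by
          simp [List.replicate_succ]]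
        rw [pvLead_replicate_append, pvLead_cons]
        simp [hx]
      rw [hl]
      omega

theorem pvPrefix_replicate_iff (c : Char) (k : Nat) (l : List Char) :
    List.replicate k c <+: l ↔ k ≤ pvLead c l := by
  induction k generalizing l with
  | zero => simp
  | succ k ih =>
      cases l with
      | nil => simp [List.replicate_succ, pvLead]
      | cons y t =>
          rw [List.replicate_succ, List.cons_prefix_cons, pvLead_cons]
          by_cases h : y == c
          · have hcy : c = y := (beq_iff_eq.mp h).symm
            rw [if_pos h, ih]
            simp only [hcy, true_and]
            omega
          · have hcy : ¬ c = y := fun e => h (beq_iff_eq.mpr e.symm)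
            rw [if_neg h]
            constructor
            · rintro ⟨e, -⟩; exact absurd e hcy
            · omega

theorem pvInfix_replicate_iff (c : Char) (k : Nat) (l : List Char) :
    List.replicate k c <:+: l ↔ k ≤ pvMrun c l := by
  induction l with
  | nil => simp [pvMrun, List.infix_nil, List.replicate_eq_nil_iff]
  | cons x t ih =>
      rw [List.infix_cons_iff, pvPrefix_replicate_iff, ih, pvMrun]
      omega

theorem pvIsIn_replicate (c : Char) (k : Nat) (l : List Char) :
    PySem.Chars.isIn (List.replicate k c) l = decide (k ≤ pvMrun c l) := by
  by_cases h : k ≤ pvMrun c l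
  · simp [h, PySem.Chars.isIn_iff_infix, pvInfix_replicate_iff]
  · simp only [h, decide_false]
    rw [PySem.Chars.isIn_eq_false_iff, pvInfix_replicate_iff]
    omega

def pvFold1 (c : Char) (st : Int × Int) (ch : Char) : Int × Int :=
  let cur := if ch == c then st.1 + 1 else 0
  (cur, max st.2 cur)

theorem pvRunStep_split (l : List Char) (hs es : Int × Int) :
    l.foldl pvRunStep (hs, es) = (l.foldl (pvFold1 'H') hs, l.foldl (pvFold1 'E') es) := by
  induction l generalizing hs es with
  | nil => rfl
  | cons ch t ih => simp only [List.foldl_cons, ih]; rfl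

theorem pvFold1_spec (c : Char) (l : List Char) (cur best : Nat) (h : cur ≤ best) :
    (l.foldl (pvFold1 c) ((cur : Int), (best : Int))).2
      = ((max best (pvMrun c (List.replicate cur c ++ l)) : Nat) : Int) := by
  induction l generalizing cur best with
  | nil =>
      simp only [List.foldl_nil, List.append_nil, pvMrun_replicate]
      have : max best cur = best := by omega
      rw [this]
  | cons x t ih =>
      by_cases hx : x == c
      · have hxc : x = c := beq_iff_eq.mp hx
        have step : pvFold1 c ((cur : Int), (best : Int)) x
            = (((cur + 1 : Nat) : Int), ((max best (cur + 1) : Nat) : Int)) := by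
          simp [pvFold1, hx]
        rw [List.foldl_cons, step, ih (cur + 1) (max best (cur + 1)) (by omega)]
        have hl : List.replicate cur c ++ x :: t = List.replicate (cur + 1) c ++ t := by
          simp [List.replicate_succ', hxc, List.append_assoc]
        rw [hl]
        have hge := pvLe_mrun_replicate_append c (cur + 1) t
        congr 1
        omega
      · have hxc : ¬ x = c := fun e => hx (beq_iff_eq.mpr e)
        have step : pvFold1 c ((cur : Int), (best : Int)) x
            = (((0 : Nat) : Int), ((best : Nat) : Int)) := by
          simp [pvFold1, hx]
        rw [List.foldl_cons, step, ih 0 best (by omega)]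
        rw [pvMrun_replicate_append_ne c x hxc cur t]
        simp only [List.replicate_zero, List.nil_append]
        have : pvMrun c (x :: t) = pvMrun c t := by
          rw [pvMrun, pvLead_cons]
          simp [hx]
        rw [this]
        congr 1
        omega

theorem pvFold1_zero (c : Char) (l : List Char) :
    (l.foldl (pvFold1 c) ((0 : Int), (0 : Int))).2 = ((pvMrun c l : Nat) : Int) := by
  have := pvFold1_spec c l 0 0 (le_refl 0)
  simpa using this

theorem pvDrop_pyRange (a e : Int) :
    (PySem.List.pyRange a e 1).drop 1 = PySem.List.pyRange (a + 1) e 1 := by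
  by_cases h : a < e
  · rw [PySem.List.pyRange_one_cons h]; rfl
  · rw [PySem.List.pyRange_one_eq_nil (by omega), PySem.List.pyRange_one_eq_nil (by omega)]
    rfl

theorem pvDropLast_pyRange (a e : Int) :
    (PySem.List.pyRange a e 1).dropLast = PySem.List.pyRange a (e - 1) 1 := by
  by_cases h : a < e
  · have h2 : a ≤ e - 1 := by omega
    have he : e = e - 1 + 1 := by omega
    conv_lhs => rw [he]
    rw [PySem.List.pyRange_one_succ_right h2, List.dropLast_concat]
  · rw [PySem.List.pyRange_one_eq_nil (by omega), PySem.List.pyRange_one_eq_nil (by omega)]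
    rfl

theorem pvAllEqual_eq_all (l : List Char) (c : Char) : pvAllEqual l c = l.all (· == c) := by
  unfold pvAllEqual
  induction l with
  | nil => rfl
  | cons x t ih => simp [List.replicate_succ, ih]

theorem pvXor_eq_bne (x y : Bool) : xor x y = (x != y) := by
  cases x <;> cases y <;> rfl


theorem pvDecide_toNat_le (x : Int) (m : Nat) :
    decide (x.toNat ≤ m) = decide ((m : Int) ≥ x) :=
  decide_eq_decide.mpr (by omega)

theorem pvDrop2_pyRange (a e : Int) :
    (PySem.List.pyRange a e 1).drop 2 = PySem.List.pyRange (a + 2) e 1 := by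
  have h : (PySem.List.pyRange a e 1).drop 2 = ((PySem.List.pyRange a e 1).drop 1).drop 1 := by
    rw [List.drop_drop]
  rw [h, pvDrop_pyRange, pvDrop_pyRange, show a + 1 + 1 = a + 2 by ring]

theorem pvPart3_eq (sec : List (Int × String)) (s b : Int) (str : List Char) :
    pvPart3A sec s b str
      = pvPart3B (pvLookA sec s == "E") (pvLookA sec b == "E") (b - s)
          ((pvMrun 'E' str : Nat) : Int) := by
  unfold pvPart3A pvPart3B
  rw [pvXor_eq_bne]
  simp only [pvIsIn_replicate, pvDecide_toNat_le]
  split_ifs <;> try rfl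
  all_goals simp only [decide_eq_true_eq, decide_eq_false_iff_not] at *
  all_goals omega

theorem pvPart2_eq (sec : List (Int × String)) (s b : Int) (str : List Char) :
    pvPart2A sec s b str
      = pvPart2B (pvAllEqual (pvGetRange sec (s + 1) (b - 1)) 'E')
          (pvAllEqual (pvGetRange sec (s + 2) (b - 2)) 'E') (b - s)
          ((pvMrun 'E' str : Nat) : Int)
          (pvLookA sec s == "E") (pvLookA sec b == "E") := by
  unfold pvPart2A pvPart2B
  rw [pvPart3_eq]
  split_ifs <;> try rfl
  all_goals simp_all

-- ===== VERDICT (by name: the statement is the Claim_ definition above) =====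
set_option maxHeartbeats 2000000 in
theorem detect_secstruct_clash_spec : Claim_equal_detect_secstruct_clash := by
  unfold Claim_equal_detect_secstruct_clash
  intro i j sec _ _
  unfold Spec_detect_secstruct_clash
  by_cases h15 : max i j - min i j ≥ 15
  · simp only [detect_secstruct_clash, detect_secstruct_clash_alt]
    rw [if_pos h15, if_pos h15]
  · have hAB : pvLookA = pvLookB := rfl
    have hfull : pvGetRange sec (min i j) (max i j)
        = ((((PySem.List.pyRange (min i j) (max i j + 1) 1).map (fun p => pvLookB sec p)).map String.toList)).flatten := by
      simp [pvGetRange, List.map_map, Function.comp_def, hAB]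
    have hint : pvGetRange sec (min i j + 1) (max i j - 1)
        = ((((PySem.List.pyRange (min i j) (max i j + 1) 1).map (fun p => pvLookB sec p)).drop 1).dropLast.map String.toList).flatten := by
      rw [← List.map_drop, ← List.map_dropLast, pvDrop_pyRange, pvDropLast_pyRange,
        show max i j + 1 - 1 = max i j by ring]
      simp only [pvGetRange, List.map_map, Function.comp_def, hAB, show max i j - 1 + 1 = max i j by ring]
    have hinn : pvGetRange sec (min i j + 2) (max i j - 2)
        = (((((PySem.List.pyRange (min i j) (max i j + 1) 1).map (fun p => pvLookB sec p)).drop 2).dropLast).dropLast.map String.toList).flatten := by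
      rw [← List.map_drop, ← List.map_dropLast, ← List.map_dropLast, pvDrop2_pyRange,
        pvDropLast_pyRange, pvDropLast_pyRange, show max i j + 1 - 1 - 1 = max i j - 1 by ring]
      simp only [pvGetRange, List.map_map, Function.comp_def, hAB, show max i j - 2 + 1 = max i j - 1 by ring]
    simp only [detect_secstruct_clash, detect_secstruct_clash_alt,
      if_neg h15, pvPart2_eq, hAB, hint, hinn, hfull, pvRunStep_split, pvFold1_zero,
      pvAllEqual_eq_all, List.all_flatten, List.all_map, Function.comp_def,
      pvIsIn_replicate, pvDecide_toNat_le, pvXor_eq_bne]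
    split_ifs <;> try rfl
    all_goals simp only [decide_eq_true_eq] at *
    all_goals omega
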